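-- pv_equiv track=rewrite | github.com/Leapense/problems | 9819번: Color Change of Go Game Pieces/Color Change of Go Game Pieces.py | count_whites
-- ===== SOURCE A (Python) =====
-- def count_whites(n, m, k):
--     mask = ((1 << m) -1) << (n - m)
--     for _ in range(k):
--         new_mask = 0
--         for i in range(n):
--             a = (mask >> (n-1-i)) &1
--             if i < n-1:
--                 b_pos = n-2-i
--             else:
--                 b_pos = n-1
--             b = (mask >> b_pos) &1
--             newi = a ^ b
--             new_mask |= (newi << (n-1-i))
--         mask = new_mask
--     return bin(mask).count('1')
-- ===== SOURCE B (Python) =====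
-- def count_whites(n, m, k):
--     # One step is x -> x XOR rotl(x, 1) on n bits, a GF(2)-linear map whose
--     # 2^e-th power is x -> x XOR rotl(x, 2^e mod n): process k bit by bit.
--     if n <= 0:
--         return 0
--     full = (1 << n) - 1
--     x = ((1 << m) - 1) << (n - m)
--     s = 1 % n
--     kk = k
--     while kk > 0:
--         if kk & 1:
--             x ^= ((x << s) | (x >> (n - s))) & full
--         kk >>= 1
--         s = (s * 2) % n
--     return bin(x).count('1')
-- ===== Notes on version B (the rewrite author's own statement) =====
-- stated objective: faster
-- what changed: Instead of simulating all k steps bit-by-bit, B uses that one step is the GF(2)-linear map x -> x XOR rotl(x,1), whose 2^e-th iterate is x -> x XOR rotl(x, 2^e mod n), so it processes the bits of k (binary exponentiation on whole-word rotations) in O(log k) big-int operations.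
import Mathlib
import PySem

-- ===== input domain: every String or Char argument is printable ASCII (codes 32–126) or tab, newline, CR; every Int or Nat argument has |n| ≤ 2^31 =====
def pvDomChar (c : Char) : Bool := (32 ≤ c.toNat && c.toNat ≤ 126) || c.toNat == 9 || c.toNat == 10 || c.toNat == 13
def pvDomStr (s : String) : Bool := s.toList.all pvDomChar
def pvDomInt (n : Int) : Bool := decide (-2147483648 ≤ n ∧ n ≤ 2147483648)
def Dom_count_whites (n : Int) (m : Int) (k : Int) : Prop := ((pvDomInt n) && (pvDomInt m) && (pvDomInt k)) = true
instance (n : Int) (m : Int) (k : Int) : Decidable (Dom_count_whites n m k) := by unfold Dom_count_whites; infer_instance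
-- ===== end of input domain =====

-- B replaces A's k-step bit-by-bit simulation by binary exponentiation of the
-- GF(2)-linear step x -> x XOR rotl(x,1), processing only the bits of k (objective: faster).

-- ===== PORT A =====

-- bin(x).count('1') for a nonnegative Python int: popcount (exact, masks are ≥ 0).

def pvPopCount (x : Nat) : Nat :=
  if x = 0 then 0 else x % 2 + pvPopCount (x / 2)
decreasing_by exact Nat.div_lt_self (Nat.pos_of_ne_zero (by assumption)) (by omega)

-- one pass of A's inner `for i in range(n)` loop (all quantities are nonnegative
-- Python ints under Pre_, so Nat shifts/and/or/xor are exact)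
def pvStepA (N : Nat) (mask : Nat) : Nat :=
  (List.range N).foldl (fun new i =>
    let a := (mask >>> (N - 1 - i)) &&& 1
    let bpos := if i < N - 1 then N - 2 - i else N - 1
    let b := (mask >>> bpos) &&& 1
    let newi := a ^^^ b
    new ||| (newi <<< (N - 1 - i))) 0

-- `range(k)` is empty for k ≤ 0, so k.toNat is exact; under Pre_, 0 ≤ m ≤ n
def count_whites (n : Int) (m : Int) (k : Int) : Int :=
  let N := n.toNat
  let mask0 : Nat := ((1 <<< m.toNat) - 1) <<< (N - m.toNat)
  let final := (List.range k.toNat).foldl (fun mask _ => pvStepA N mask) mask0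
  Int.ofNat (pvPopCount final)

-- ===== PORT B =====

-- B's `while kk > 0` loop (Source B keeps the invariant s = 2^e mod n < n)
def pvGo (N full : Nat) (kk x s : Nat) : Nat :=
  if kk = 0 then x
  else pvGo N full (kk / 2)
        (if kk % 2 = 1 then x ^^^ (((x <<< s) ||| (x >>> (N - s))) &&& full) else x)
        ((s * 2) % N)
decreasing_by exact Nat.div_lt_self (Nat.pos_of_ne_zero (by assumption)) (by omega)

def count_whites_alt (n : Int) (m : Int) (k : Int) : Int :=
  if n ≤ 0 then 0
  else
    let N := n.toNat
    let full := (1 <<< N) - 1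
    let x := ((1 <<< m.toNat) - 1) <<< (N - m.toNat)
    Int.ofNat (pvPopCount (pvGo N full k.toNat x (1 % N)))


-- ===== PRECONDITION & SPEC =====
-- Pre_ is exactly A's no-raise domain: for m < 0 or m > n, Python's `1 << m` /
-- `<< (n - m)` raises ValueError (negative shift count); Pre_ excludes nothing A returns on.
def Pre_count_whites (n : Int) (m : Int) (_k : Int) : Prop := 0 ≤ m ∧ m ≤ n
instance (n : Int) (m : Int) (k : Int) : Decidable (Pre_count_whites n m k) := by
  unfold Pre_count_whites; infer_instance

def pvWitness_count_whites : Int × Int × Int := (4, 2, 3)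

def Spec_count_whites (n : Int) (m : Int) (k : Int) (out : Int) : Prop := out = count_whites_alt n m k
instance (n : Int) (m : Int) (k : Int) (out : Int) : Decidable (Spec_count_whites n m k out) := by unfold Spec_count_whites; infer_instance

-- ===== CLAIM (what is proved, stated in full; the proofs are below) =====
def Claim_equal_count_whites : Prop := ∀ (n : Int) (m : Int) (k : Int), Dom_count_whites n m k → Pre_count_whites n m k → Spec_count_whites n m k (count_whites n m k)

-- ===== LEMMAS AND PROOFS =====

-- B's loop body as a function: F_s(x) = x XOR rotl(x, s) on N bits.

theorem pvLtTwoPow (x n : Nat) (h : ∀ i, n ≤ i → x.testBit i = false) : x < 2^n := by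
  have hx : x = x % 2^n := by
    apply Nat.eq_of_testBit_eq; intro i
    rw [Nat.testBit_mod_two_pow]
    by_cases hi : i < n
    · simp [hi]
    · simp [hi, h i (by omega)]
  rw [hx]; exact Nat.mod_lt _ (by positivity)

theorem pvTestBitHigh {x n i : Nat} (h : x < 2^n) (hi : n ≤ i) : x.testBit i = false :=
  Nat.testBit_eq_false_of_lt (lt_of_lt_of_le h (Nat.pow_le_pow_right (by norm_num) hi))

theorem pvOneShl (N : Nat) : (1 <<< N) - 1 = 2^N - 1 := by rw [Nat.shiftLeft_eq, one_mul]

theorem pvBitExtract (x p : Nat) : (x >>> p) &&& 1 = if x.testBit p then 1 else 0 := by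
  rcases Nat.mod_two_eq_zero_or_one (x >>> p) with h | h <;>
    simp [Nat.testBit, Nat.and_one_is_mod, h]

theorem pvModIdx (N p s : Nat) (hp : p < N) (hs : s < N) :
    (p + N - s) % N = if s ≤ p then p - s else p + N - s := by
  split
  · have h : p + N - s = (p - s) + N := by omega
    rw [h, Nat.add_mod_right, Nat.mod_eq_of_lt (by omega)]
  · exact Nat.mod_eq_of_lt (by omega)

theorem pvModTwo (N s : Nat) (hs : s < N) :
    (s * 2) % N = if s * 2 < N then s * 2 else s * 2 - N := by
  split
  · exact Nat.mod_eq_of_lt (by omega)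
  · have h : s * 2 = (s * 2 - N) + N := by omega
    conv_lhs => rw [h]
    rw [Nat.add_mod_right]
    exact Nat.mod_eq_of_lt (by omega)

theorem pvTestBitOne (j : Nat) : Nat.testBit 1 j = decide (j = 0) := by
  have := Nat.testBit_two_pow (n := 0) (m := j)
  simpa [eq_comm] using this

theorem pvFoldChar (N : Nat) (f : Nat → Nat) (hf : ∀ i, f i ≤ 1) :
    ∀ L, L ≤ N → ∀ p,
      (((List.range L).foldl (fun new i => new ||| (f i <<< (N - 1 - i))) 0).testBit p)
        = (decide (N - L ≤ p) && decide (p < N) && decide (f (N - 1 - p) = 1)) := by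
  intro L
  induction L with
  | zero =>
    intro _ p
    simp only [List.range_zero, List.foldl_nil, Nat.zero_testBit, Nat.sub_zero]
    by_cases h2 : p < N
    · simp [show ¬ N ≤ p by omega]
    · simp [h2]
  | succ L ih =>
    intro hL p
    rw [List.range_succ, List.foldl_append, List.foldl_cons, List.foldl_nil,
        Nat.testBit_or, ih (by omega) p, Nat.testBit_shiftLeft,
        Bool.eq_iff_iff]
    simp only [Bool.or_eq_true, Bool.and_eq_true, decide_eq_true_eq, ge_iff_le]
    have hfL := hf L
    interval_cases h : f L
    · simp only [Nat.zero_testBit, Bool.false_eq_true, and_false, or_false]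
      constructor
      · rintro ⟨⟨h1, h2⟩, h3⟩; exact ⟨⟨by omega, h2⟩, h3⟩
      · rintro ⟨⟨h1, h2⟩, h3⟩
        refine ⟨⟨?_, h2⟩, h3⟩
        by_contra hc
        have hpe : N - 1 - p = L := by omega
        rw [hpe] at h3; omega
    · simp only [pvTestBitOne, decide_eq_true_eq]
      constructor
      · rintro (⟨⟨h1, h2⟩, h3⟩ | ⟨h1, h2⟩)
        · exact ⟨⟨by omega, h2⟩, h3⟩
        · have hpe : p = N - 1 - L := by omega
          have hip : N - 1 - p = L := by omega
          exact ⟨⟨by omega, by omega⟩, by rw [hip, h]⟩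
      · rintro ⟨⟨h1, h2⟩, h3⟩
        by_cases hc : N - L ≤ p
        · exact Or.inl ⟨⟨hc, h2⟩, h3⟩
        · exact Or.inr ⟨by omega, by omega⟩

theorem pvStepChar (N mask p : Nat) :
    (pvStepA N mask).testBit p
      = (decide (p < N) && (mask.testBit p ^^ mask.testBit ((p + N - 1) % N))) := by
  have hf : ∀ i, ((mask >>> (N - 1 - i)) &&& 1) ^^^
      ((mask >>> (if i < N - 1 then N - 2 - i else N - 1)) &&& 1) ≤ 1 := by
    intro i
    rw [pvBitExtract, pvBitExtract]
    split_ifs <;> decide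
  have hfold := pvFoldChar N
    (fun i => ((mask >>> (N - 1 - i)) &&& 1) ^^^
      ((mask >>> (if i < N - 1 then N - 2 - i else N - 1)) &&& 1)) hf N le_rfl p
  have hstep : (pvStepA N mask).testBit p
      = (decide (N - N ≤ p) && decide (p < N) &&
        decide ((((mask >>> (N - 1 - (N - 1 - p))) &&& 1) ^^^
          ((mask >>> (if N - 1 - p < N - 1 then N - 2 - (N - 1 - p) else N - 1)) &&& 1)) = 1)) := by
    simpa [pvStepA] using hfold
  rw [hstep]
  by_cases hp : p < N
  · have e1 : N - 1 - (N - 1 - p) = p := by omega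
    have e2 : (if N - 1 - p < N - 1 then N - 2 - (N - 1 - p) else N - 1)
        = (p + N - 1) % N := by
      by_cases hp1 : 1 ≤ p
      · have : N - 1 - p < N - 1 := by omega
        rw [if_pos this]
        have h : p + N - 1 = (p - 1) + N := by omega
        rw [h, Nat.add_mod_right, Nat.mod_eq_of_lt (by omega)]
        omega
      · have hp0 : p = 0 := by omega
        have : ¬ (N - 1 - p < N - 1) := by omega
        rw [if_neg this, hp0]
        have h : 0 + N - 1 = N - 1 := by omega
        rw [h, Nat.mod_eq_of_lt (by omega)]
    rw [e1, e2]
    simp only [show N - N ≤ p by omega, decide_true, Bool.true_and, hp]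
    rw [pvBitExtract, pvBitExtract]
    cases hA : mask.testBit p <;> cases hB : mask.testBit ((p + N - 1) % N) <;> simp
  · simp [hp]

theorem pvRotChar (N s x p : Nat) (hs : s < N) (hx : x < 2^N) :
    (((x <<< s) ||| (x >>> (N - s))) &&& ((1 <<< N) - 1)).testBit p
      = (decide (p < N) && x.testBit ((p + N - s) % N)) := by
  rw [pvOneShl, Nat.testBit_and, Nat.testBit_or, Nat.testBit_shiftLeft,
      Nat.testBit_shiftRight, Nat.testBit_two_pow_sub_one]
  by_cases hp : p < N
  · rw [pvModIdx N p s hp hs]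
    by_cases hsp : s ≤ p
    · have hhigh : x.testBit (N - s + p) = false := pvTestBitHigh hx (by omega)
      simp [hp, hsp, hhigh, ge_iff_le]
    · have e : N - s + p = p + N - s := by omega
      simp [hp, hsp, e, ge_iff_le]
  · simp [hp]

def pvF (N s x : Nat) : Nat := x ^^^ (((x <<< s) ||| (x >>> (N - s))) &&& ((1 <<< N) - 1))

theorem pvFChar (N s x p : Nat) (hs : s < N) (hx : x < 2^N) :
    (pvF N s x).testBit p = (x.testBit p ^^ (decide (p < N) && x.testBit ((p + N - s) % N))) := by
  rw [pvF, Nat.testBit_xor, pvRotChar N s x p hs hx]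

theorem pvFBound (N s x : Nat) (hx : x < 2^N) : pvF N s x < 2^N := by
  apply Nat.xor_lt_two_pow hx
  have h1 : ((x <<< s) ||| (x >>> (N - s))) &&& ((1 <<< N) - 1) ≤ (1 <<< N) - 1 :=
    Nat.and_le_right
  have h2 : 0 < 2^N := by positivity
  refine lt_of_le_of_lt h1 ?_
  rw [pvOneShl]
  omega

theorem pvStepBound (N mask : Nat) : pvStepA N mask < 2^N := by
  apply pvLtTwoPow
  intro i hi
  rw [pvStepChar]
  simp [show ¬ i < N by omega]

theorem pvIterBound (N E y : Nat) (hy : y < 2^N) : (pvStepA N)^[E] y < 2^N := by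
  cases E with
  | zero => simpa using hy
  | succ E => rw [Function.iterate_succ_apply']; exact pvStepBound N _

theorem pvStepEq (N x : Nat) (hN : 0 < N) (hx : x < 2^N) : pvF N (1 % N) x = pvStepA N x := by
  apply Nat.eq_of_testBit_eq
  intro p
  rw [pvFChar N (1 % N) x p (Nat.mod_lt _ hN) hx, pvStepChar]
  by_cases hp : p < N
  · have e : (p + N - 1 % N) % N = (p + N - 1) % N := by
      rcases Nat.lt_or_ge N 2 with h2 | h2
      · have hN1 : N = 1 := by omega
        have hp0 : p = 0 := by omega
        subst hN1; subst hp0; rfl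
      · rw [Nat.mod_eq_of_lt (show 1 < N by omega)]
    rw [e]
    simp [hp]
  · have h1 : x.testBit p = false := pvTestBitHigh hx (by omega)
    simp [hp, h1]

theorem pvFComp (N s x : Nat) (hs : s < N) (hx : x < 2^N) :
    pvF N ((s * 2) % N) x = pvF N s (pvF N s x) := by
  have hN : 0 < N := by omega
  have ht : (s * 2) % N < N := Nat.mod_lt _ hN
  have hy : pvF N s x < 2^N := pvFBound N s x hx
  apply Nat.eq_of_testBit_eq
  intro p
  rw [pvFChar N _ x p ht hx, pvFChar N s _ p hs hy]
  by_cases hp : p < N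
  · have hq1 : (p + N - s) % N < N := Nat.mod_lt _ hN
    rw [pvFChar N s x p hs hx, pvFChar N s x _ hs hx]
    have hidx : ((p + N - s) % N + N - s) % N = (p + N - (s * 2) % N) % N := by
      rw [pvModIdx N p s hp hs, pvModTwo N s hs]
      by_cases h1 : s ≤ p
      · rw [if_pos h1, pvModIdx N (p - s) s (by omega) hs]
        by_cases h2 : s * 2 < N
        · rw [if_pos h2, pvModIdx N p (s * 2) hp (by omega)]
          split_ifs <;> omega
        · rw [if_neg h2, pvModIdx N p (s * 2 - N) hp (by omega)]
          split_ifs <;> omega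
      · rw [if_neg h1, pvModIdx N (p + N - s) s (by omega) hs]
        by_cases h2 : s * 2 < N
        · rw [if_pos h2, pvModIdx N p (s * 2) hp (by omega)]
          split_ifs <;> omega
        · rw [if_neg h2, pvModIdx N p (s * 2 - N) hp (by omega)]
          split_ifs <;> omega
    rw [hidx]
    simp only [hp, decide_true, Bool.true_and, hq1]
    cases x.testBit p <;> cases x.testBit ((p + N - (s * 2) % N) % N) <;>
      cases x.testBit ((p + N - s) % N) <;> simp
  · have h1 : x.testBit p = false := pvTestBitHigh hx (by omega)
    have h2 : (pvF N s x).testBit p = false := pvTestBitHigh hy (by omega)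
    simp [hp, h1, h2]

theorem pvGoEq (N : Nat) (hN : 0 < N) :
    ∀ K x s E, x < 2^N → s < N →
      (∀ y, y < 2^N → pvF N s y = (pvStepA N)^[E] y) →
      pvGo N ((1 <<< N) - 1) K x s = (pvStepA N)^[K * E] x := by
  intro K
  induction K using Nat.strong_induction_on with
  | _ K ih =>
    intro x s E hx hs hF
    rw [pvGo]
    by_cases hK : K = 0
    · simp [hK]
    · rw [if_neg hK]
      have hx' : (if K % 2 = 1 then x ^^^ (((x <<< s) ||| (x >>> (N - s))) &&& ((1 <<< N) - 1)) else x)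
          = (pvStepA N)^[K % 2 * E] x := by
        by_cases hK2 : K % 2 = 1
        · rw [if_pos hK2, hK2, one_mul, ← hF x hx, pvF]
        · have h0 : K % 2 = 0 := by omega
          rw [if_neg hK2, h0, zero_mul, Function.iterate_zero_apply]
      have hxb : (if K % 2 = 1 then x ^^^ (((x <<< s) ||| (x >>> (N - s))) &&& ((1 <<< N) - 1)) else x) < 2^N := by
        rw [hx']; exact pvIterBound N _ x hx
      have hF' : ∀ y, y < 2^N → pvF N ((s * 2) % N) y = (pvStepA N)^[E + E] y := by
        intro y hy
        rw [pvFComp N s y hs hy, hF y hy, hF _ (pvIterBound N E y hy),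
          ← Function.iterate_add_apply]
      rw [ih (K / 2) (by omega) _ ((s * 2) % N) (E + E) hxb (Nat.mod_lt _ hN) hF', hx',
        ← Function.iterate_add_apply]
      congr 1
      have hK2 : K = 2 * (K / 2) + K % 2 := (Nat.div_add_mod K 2).symm
      conv_rhs => rw [hK2]
      ring

theorem pvFoldIter (f : Nat → Nat) (K x : Nat) :
    (List.range K).foldl (fun m _ => f m) x = f^[K] x := by
  induction K generalizing x with
  | zero => simp
  | succ K ih => simp [List.range_succ, Function.iterate_succ_apply', ← ih]

theorem pvMaskBound (N M : Nat) (hM : M ≤ N) : ((1 <<< M) - 1) <<< (N - M) < 2^N := by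
  rw [pvOneShl, Nat.shiftLeft_eq]
  have h1 : 2^M - 1 < 2^M := by
    have : 0 < 2^M := by positivity
    omega
  calc (2^M - 1) * 2^(N - M) < 2^M * 2^(N - M) := by
        exact Nat.mul_lt_mul_of_lt_of_le h1 le_rfl (by positivity)
    _ = 2^N := by rw [← pow_add]; congr 1; omega

theorem count_whites_spec' : ∀ (n m k : Int), 0 ≤ m → m ≤ n →
    count_whites n m k = count_whites_alt n m k := by
  intro n m k hm hmn
  by_cases hn : n ≤ 0
  · have hn0 : n = 0 := le_antisymm hn (le_trans hm hmn)
    have hm0 : m = 0 := le_antisymm (by omega) hm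
    subst hn0; subst hm0
    simp only [count_whites, count_whites_alt, if_pos (le_refl (0:Int))]
    have hfix : pvStepA 0 0 = 0 := by simp [pvStepA]
    rw [show ((0:Int).toNat) = 0 from rfl]
    rw [show ((1 <<< (0:Nat)) - 1) <<< (0 - 0) = 0 from rfl]
    rw [pvFoldIter, Function.iterate_fixed hfix]
    simp [pvPopCount]
  · simp only [count_whites, count_whites_alt, if_neg hn]
    have hN : 0 < n.toNat := by omega
    have hM : m.toNat ≤ n.toNat := by omega
    have hmask : ((1 <<< m.toNat) - 1) <<< (n.toNat - m.toNat) < 2^n.toNat :=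
      pvMaskBound _ _ hM
    rw [pvFoldIter]
    rw [pvGoEq n.toNat hN k.toNat _ (1 % n.toNat) 1 hmask (Nat.mod_lt _ hN)
      (fun y hy => by rw [pvStepEq n.toNat y hN hy, Function.iterate_one])]
    rw [mul_one]

-- ===== VERDICT (by name: the statement is the Claim_ definition above) =====
theorem count_whites_spec : Claim_equal_count_whites := by
  intro n m k _ hpre
  unfold Spec_count_whites
  exact count_whites_spec' n m k hpre.1 hpre.2
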